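-- pv_equiv track=rewrite | github.com/th-rpy/jackson_job_shop_scheduling | src/jacksonpy/utils.py | gant_list
-- ===== SOURCE A (Python) =====
-- def gant_list(C):
--     db1, db2 = [], []
--
--     db1.append([0, C[0][1]])
--     for i in range(1, len(C)):
--         db1.append([db1[i - 1][1], db1[i - 1][1] + C[i][1]])
--     db2.append([db1[0][1], db1[0][1] + C[0][2]])
--     for i in range(1, len(db1)):
--         if db1[i][1] >= db2[i - 1][1]:
--             db2.append([db1[i][1], db1[i][1] + C[i][2]])
--         else:
--             db2.append([db2[i - 1][1], db2[i - 1][1] + C[i][2]])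
--     return db1, db2
-- ===== SOURCE B (Python) =====
-- def gant_list(C):
--     # Closed form via prefix sums: machine-1 finishes are the prefix sums of the
--     # first durations, and machine-2 finishes obey the flow-shop identity
--     # f2[i] = P2(i+1) + max_{k<=i}(P1(k+1) - P2(k)), a cumulative-max of delays;
--     # the intervals are then reconstructed by zipping (interval = [finish-duration, finish]).
--     p1, p2 = [0], [0]
--     for row in C:
--         p1.append(p1[-1] + row[1])
--         p2.append(p2[-1] + row[2])
--     m = p1[1]                      # raises IndexError on empty C, like A
--     delays = []
--     for hi, lo in zip(p1[1:], p2):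
--         m = max(m, hi - lo)
--         delays.append(m)
--     db1 = [[s, f] for s, f in zip(p1, p1[1:])]
--     f2 = [q + d for q, d in zip(p2[1:], delays)]
--     db2 = [[f - row[2], f] for f, row in zip(f2, C)]
--     return db1, db2
-- ===== Notes on version B (the rewrite author's own statement) =====
-- stated objective: alternative
-- what changed: Replaces A's interval-to-interval recurrence (each db2 start chosen by comparing back-indexed entries of the partially built lists) with a closed-form computation: prefix sums of both duration columns, the flow-shop identity f2[i] = P2(i+1) + max_{k<=i}(P1(k+1) - P2(k)) realised as a cumulative max of delays, and the interval lists reconstructed by zipping adjacent prefix sums / finish-minus-duration.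
import Mathlib
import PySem

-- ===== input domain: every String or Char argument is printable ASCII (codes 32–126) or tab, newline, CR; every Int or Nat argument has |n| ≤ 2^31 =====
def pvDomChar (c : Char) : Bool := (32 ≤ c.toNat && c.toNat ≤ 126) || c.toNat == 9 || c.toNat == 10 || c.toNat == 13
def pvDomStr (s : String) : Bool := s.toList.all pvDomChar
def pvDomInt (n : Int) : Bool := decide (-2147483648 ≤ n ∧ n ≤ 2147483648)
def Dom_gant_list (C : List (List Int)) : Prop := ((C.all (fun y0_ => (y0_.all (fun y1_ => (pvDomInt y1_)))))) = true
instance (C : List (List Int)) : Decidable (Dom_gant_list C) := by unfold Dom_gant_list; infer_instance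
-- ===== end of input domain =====

-- B replaces A's back-indexing interval recurrence by a closed-form computation:
-- prefix sums of both duration columns, a cumulative max of delays P1(k+1)-P2(k)
-- (the two-machine flow-shop identity), and interval lists rebuilt by zipping.

-- xs[i][j] as read by A (Pre_ guarantees both indexes in range wherever A runs)
def aIdx (xs : List (List Int)) (i j : Int) : Int :=
  PySem.List.pyGetD (PySem.List.pyGetD xs i []) j 0

-- ===== PORT A =====
def gant_list (C : List (List Int)) : List (List Int) × List (List Int) :=
  let db1 : List (List Int) := [] ++ [[0, aIdx C 0 1]]
  let db1 := (PySem.List.pyRange 1 (PySem.List.len C) 1).foldl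
    (fun db1 i => db1 ++ [[aIdx db1 (i - 1) 1, aIdx db1 (i - 1) 1 + aIdx C i 1]]) db1
  let db2 : List (List Int) := [] ++ [[aIdx db1 0 1, aIdx db1 0 1 + aIdx C 0 2]]
  let db2 := (PySem.List.pyRange 1 (PySem.List.len db1) 1).foldl
    (fun db2 i =>
      if aIdx db1 i 1 ≥ aIdx db2 (i - 1) 1 then
        db2 ++ [[aIdx db1 i 1, aIdx db1 i 1 + aIdx C i 2]]
      else
        db2 ++ [[aIdx db2 (i - 1) 1, aIdx db2 (i - 1) 1 + aIdx C i 2]]) db2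
  (db1, db2)

-- ===== PORT B =====
-- row[j] as read by B (Pre_ guarantees j in range wherever B runs)
def rIdx (r : List Int) (j : Int) : Int := PySem.List.pyGetD r j 0

def gant_list_alt (C : List (List Int)) : List (List Int) × List (List Int) :=
  let pp := C.foldl (fun (p : List Int × List Int) row =>
      (p.1 ++ [PySem.List.pyGetD p.1 (-1) 0 + rIdx row 1],
       p.2 ++ [PySem.List.pyGetD p.2 (-1) 0 + rIdx row 2])) ([0], [0])
  let m0 := PySem.List.pyGetD pp.1 1 0   -- p1[1]; Pre_ guarantees C ≠ [] so the index is in range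
  let dm := (List.zip (PySem.List.slice pp.1 (some 1) none) pp.2).foldl
      (fun (st : List Int × Int) hl =>
        let m := max st.2 (hl.1 - hl.2)
        (st.1 ++ [m], m)) ([], m0)
  let db1 := (List.zip pp.1 (PySem.List.slice pp.1 (some 1) none)).map (fun sf => [sf.1, sf.2])
  let f2 := (List.zip (PySem.List.slice pp.2 (some 1) none) dm.1).map (fun qd => qd.1 + qd.2)
  let db2 := (List.zip f2 C).map (fun fr => [fr.1 - rIdx fr.2 2, fr.1])
  (db1, db2)

-- ===== PRECONDITION & SPEC =====
-- Pre_ excludes exactly the inputs where Python A raises IndexError: empty C (C[0]) or a row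
-- shorter than 3 (row[1]/row[2]); B raises on exactly the same inputs.
def Pre_gant_list (C : List (List Int)) : Prop := C ≠ [] ∧ ∀ r ∈ C, 3 ≤ r.length
instance (C : List (List Int)) : Decidable (Pre_gant_list C) := by unfold Pre_gant_list; infer_instance
def pvWitness_gant_list : List (List Int) := [[1, 2, 3], [4, 5, 6]]

def Spec_gant_list (C : List (List Int)) (out : List (List Int) × List (List Int)) : Prop := out = gant_list_alt C
instance (C : List (List Int)) (out : List (List Int) × List (List Int)) : Decidable (Spec_gant_list C out) := by unfold Spec_gant_list; infer_instance

-- ===== CLAIM (what is proved, stated in full; the proofs are below) =====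
def Claim_equal_gant_list : Prop := ∀ (C : List (List Int)), Dom_gant_list C → Pre_gant_list C → Spec_gant_list C (gant_list C)

-- ===== LEMMAS AND PROOFS =====

-- the machine-1 interval list generated from running end-time t (characterizes A's first loop)
def mk1 (t : Int) : List (List Int) → List (List Int)
  | [] => []
  | r :: rs => [t, t + rIdx r 1] :: mk1 (t + rIdx r 1) rs

-- the machine-2 interval list generated from running end-times t1, t2 (characterizes A's second loop)
def mk2 (t1 t2 : Int) : List (List Int) → List (List Int)
  | [] => []
  | r :: rs =>
      let t1' := t1 + rIdx r 1
      let s2 := max t1' t2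
      [s2, s2 + rIdx r 2] :: mk2 t1' (s2 + rIdx r 2) rs

-- running sums of column j starting from t (tail of B's prefix-sum list)
def sc (j t : Int) : List (List Int) → List Int
  | [] => []
  | r :: rs => (t + rIdx r j) :: sc j (t + rIdx r j) rs

-- running maxima seeded with m (B's delays list)
def cummax (m : Int) : List Int → List Int
  | [] => []
  | d :: ds => max m d :: cummax (max m d) ds

-- machine-2 finish times from running end-times t1, t2
def fin2 (t1 t2 : Int) : List (List Int) → List Int
  | [] => []
  | r :: rs =>
      let f := max (t1 + rIdx r 1) t2 + rIdx r 2
      f :: fin2 (t1 + rIdx r 1) f rs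

theorem length_mk1 (rows : List (List Int)) : ∀ t, (mk1 t rows).length = rows.length := by
  induction rows with
  | nil => intro t; rfl
  | cons r rs ih => intro t; simp [mk1, ih]

theorem aIdx_append_last (db : List (List Int)) (x y : Int) :
    aIdx (db ++ [[x, y]]) ((db.length : Nat) : Int) 1 = y := by
  simp [aIdx, PySem.List.pyGetD]

theorem alt_pp (rows : List (List Int)) :
    ∀ (b1 b2 : List Int) (t1 t2 : Int),
    rows.foldl (fun (p : List Int × List Int) row =>
      (p.1 ++ [PySem.List.pyGetD p.1 (-1) 0 + rIdx row 1],
       p.2 ++ [PySem.List.pyGetD p.2 (-1) 0 + rIdx row 2])) (b1 ++ [t1], b2 ++ [t2])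
    = (b1 ++ [t1] ++ sc 1 t1 rows, b2 ++ [t2] ++ sc 2 t2 rows) := by
  induction rows with
  | nil => intro b1 b2 t1 t2; simp [sc]
  | cons r rs ih =>
      intro b1 b2 t1 t2
      simp only [List.foldl_cons, PySem.List.pyGetD_neg_one_append_singleton]
      have := ih (b1 ++ [t1]) (b2 ++ [t2]) (t1 + rIdx r 1) (t2 + rIdx r 2)
      simp only [List.append_assoc] at this ⊢
      rw [this]
      simp [sc]

theorem alt_delays (l : List (Int × Int)) :
    ∀ (acc : List Int) (m : Int),
    l.foldl (fun (st : List Int × Int) hl =>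
        let m := max st.2 (hl.1 - hl.2)
        (st.1 ++ [m], m)) (acc, m)
    = (acc ++ cummax m (l.map (fun hl => hl.1 - hl.2)),
       (l.map (fun hl => hl.1 - hl.2)).foldl max m) := by
  induction l with
  | nil => intro acc m; simp [cummax]
  | cons hl l ih =>
      intro acc m
      simp only [List.foldl_cons, List.map_cons]
      rw [ih]
      simp [cummax]

theorem map_zip_eq_zipWith {α β γ : Type} (f : α × β → γ) (a : List α) (b : List β) :
    (List.zip a b).map f = List.zipWith (fun x y => f (x, y)) a b := by
  induction a generalizing b with
  | nil => simp
  | cons x xs ih => cases b with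
    | nil => simp
    | cons y ys => simp [ih]

-- B's closed form for the machine-2 finish times (flow-shop identity)
theorem fin2_closed (rows : List (List Int)) :
    ∀ (t1 q m : Int),
    fin2 t1 (q + m) rows
    = List.zipWith (fun a b => a + b) (sc 2 q rows)
        (cummax m (List.zipWith (fun a b => a - b) (sc 1 t1 rows) (q :: sc 2 q rows))) := by
  induction rows with
  | nil => intro t1 q m; simp [fin2, sc]
  | cons r rs ih =>
      intro t1 q m
      simp only [fin2, sc, List.zipWith_cons_cons, cummax, List.cons.injEq]
      refine ⟨by omega, ?_⟩
      have h : max (t1 + rIdx r 1) (q + m) + rIdx r 2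
          = (q + rIdx r 2) + max m (t1 + rIdx r 1 - q) := by omega
      rw [h, ih (t1 + rIdx r 1) (q + rIdx r 2) (max m (t1 + rIdx r 1 - q))]

theorem mk1_eq_zip (rows : List (List Int)) :
    ∀ t, mk1 t rows = List.zipWith (fun s f => [s, f]) (t :: sc 1 t rows) (sc 1 t rows) := by
  induction rows with
  | nil => intro t; simp [mk1, sc]
  | cons r rs ih => intro t; simp [mk1, sc, ih]

theorem mk2_eq_zip (rows : List (List Int)) :
    ∀ t1 t2, mk2 t1 t2 rows
      = List.zipWith (fun f r => [f - rIdx r 2, f]) (fin2 t1 t2 rows) rows := by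
  induction rows with
  | nil => intro t1 t2; simp [mk2, fin2]
  | cons r rs ih =>
      intro t1 t2
      simp only [mk2, fin2, List.zipWith_cons_cons, List.cons.injEq]
      refine ⟨by simp, ih (t1 + rIdx r 1) _⟩

theorem loop1_inv (C : List (List Int)) :
    ∀ (suf : List (List Int)) (j : Nat) (db1 : List (List Int)) (t : Int),
    C.drop j = suf → db1.length = j → 0 < j →
    aIdx db1 ((j : Int) - 1) 1 = t →
    (PySem.List.pyRange (j : Int) (PySem.List.len C) 1).foldl
      (fun db1 i => db1 ++ [[aIdx db1 (i - 1) 1, aIdx db1 (i - 1) 1 + aIdx C i 1]]) db1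
    = db1 ++ mk1 t suf := by
  intro suf
  induction suf with
  | nil =>
      intro j db1 t hdrop hlen hj hlast
      have hle : C.length ≤ j := List.drop_eq_nil_iff.mp hdrop
      rw [PySem.List.pyRange_one_eq_nil (by simp [PySem.List.len]; omega)]
      simp [mk1]
  | cons r rs ih =>
      intro j db1 t hdrop hlen hj hlast
      have hjlt : j < C.length := by
        by_contra h
        rw [List.drop_eq_nil_of_le (by omega)] at hdrop
        simp at hdrop
      have hCj : C[j] = r := by
        have := List.getElem_drop (i := j) (j := 0) (xs := C) (h := by simpa using hjlt)
        simp [hdrop] at this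
        simpa using this.symm
      rw [PySem.List.pyRange_one_cons (by simp [PySem.List.len]; omega)]
      simp only [List.foldl_cons]
      rw [hlast]
      have haC : aIdx C (j : Int) 1 = rIdx r 1 := by
        simp [aIdx, rIdx, PySem.List.pyGetD_natCast, List.getD_eq_getElem?_getD,
          List.getElem?_eq_getElem hjlt, hCj]
      rw [haC]
      have hnext : C.drop (j + 1) = rs := by
        have : (C.drop j).drop 1 = rs := by rw [hdrop]; rfl
        simpa [List.drop_drop, Nat.add_comm] using this
      have hlast' : aIdx (db1 ++ [[t, t + rIdx r 1]]) (((j + 1 : Nat) : Int) - 1) 1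
          = t + rIdx r 1 := by
        have hcast : (((j + 1 : Nat) : Int) - 1) = ((db1.length : Nat) : Int) := by
          rw [hlen]; push_cast; ring
        rw [hcast, aIdx_append_last]
      have := ih (j + 1) (db1 ++ [[t, t + rIdx r 1]]) (t + rIdx r 1) hnext
        (by simp [hlen]) (by omega) hlast'
      push_cast at this ⊢
      rw [this]
      simp [mk1]

theorem loop2_inv (C D1 : List (List Int)) (hD : D1.length = C.length) :
    ∀ (suf : List (List Int)) (j : Nat) (db2 : List (List Int)) (t1 t2 : Int),
    C.drop j = suf → D1.drop j = mk1 t1 suf → db2.length = j → 0 < j →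
    aIdx db2 ((j : Int) - 1) 1 = t2 →
    (PySem.List.pyRange (j : Int) (PySem.List.len D1) 1).foldl
      (fun db2 i =>
        if aIdx D1 i 1 ≥ aIdx db2 (i - 1) 1 then
          db2 ++ [[aIdx D1 i 1, aIdx D1 i 1 + aIdx C i 2]]
        else
          db2 ++ [[aIdx db2 (i - 1) 1, aIdx db2 (i - 1) 1 + aIdx C i 2]]) db2
    = db2 ++ mk2 t1 t2 suf := by
  intro suf
  induction suf with
  | nil =>
      intro j db2 t1 t2 hdrop hD1 hlen hj hlast
      have hle : C.length ≤ j := List.drop_eq_nil_iff.mp hdrop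
      rw [PySem.List.pyRange_one_eq_nil (by simp [PySem.List.len]; omega)]
      simp [mk2]
  | cons r rs ih =>
      intro j db2 t1 t2 hdrop hD1 hlen hj hlast
      have hjlt : j < C.length := by
        by_contra h
        rw [List.drop_eq_nil_of_le (by omega)] at hdrop
        simp at hdrop
      have hCj : C[j] = r := by
        have := List.getElem_drop (i := j) (j := 0) (xs := C) (h := by simpa using hjlt)
        simp [hdrop] at this
        simpa using this.symm
      have hjD : j < D1.length := by omega
      have hD1j : D1[j] = [t1, t1 + rIdx r 1] := by
        have := List.getElem_drop (i := j) (j := 0) (xs := D1) (h := by simpa using hjD)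
        simp [hD1, mk1] at this
        simpa using this.symm
      rw [PySem.List.pyRange_one_cons (by simp [PySem.List.len]; omega)]
      simp only [List.foldl_cons]
      have haD : aIdx D1 (j : Int) 1 = t1 + rIdx r 1 := by
        simp [aIdx, rIdx, List.getElem?_eq_getElem hjD, hD1j, PySem.List.pyGetD]
      have haC : aIdx C (j : Int) 2 = rIdx r 2 := by
        simp [aIdx, rIdx, PySem.List.pyGetD_natCast, List.getD_eq_getElem?_getD,
          List.getElem?_eq_getElem hjlt, hCj]
      rw [hlast, haD, haC]
      set t1' := t1 + rIdx r 1 with ht1'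
      set s2 := max t1' t2 with hs2
      have hbranch :
          (if t1' ≥ t2 then db2 ++ [[t1', t1' + rIdx r 2]] else db2 ++ [[t2, t2 + rIdx r 2]])
          = db2 ++ [[s2, s2 + rIdx r 2]] := by
        by_cases h : t1' ≥ t2
        · rw [if_pos h, hs2, max_eq_left h]
        · rw [if_neg h, hs2, max_eq_right (le_of_lt (lt_of_not_ge h))]
      rw [hbranch]
      have hnext : C.drop (j + 1) = rs := by
        have : (C.drop j).drop 1 = rs := by rw [hdrop]; rfl
        simpa [List.drop_drop, Nat.add_comm] using this
      have hnextD : D1.drop (j + 1) = mk1 t1' rs := by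
        have : (D1.drop j).drop 1 = mk1 t1' rs := by rw [hD1]; simp [mk1, ht1']
        simpa [List.drop_drop, Nat.add_comm] using this
      have hlast' : aIdx (db2 ++ [[s2, s2 + rIdx r 2]]) (((j + 1 : Nat) : Int) - 1) 1
          = s2 + rIdx r 2 := by
        have hcast : (((j + 1 : Nat) : Int) - 1) = ((db2.length : Nat) : Int) := by
          rw [hlen]; push_cast; ring
        rw [hcast, aIdx_append_last]
      have := ih (j + 1) (db2 ++ [[s2, s2 + rIdx r 2]]) t1' (s2 + rIdx r 2) hnext hnextD
        (by simp [hlen]) (by omega) hlast'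
      push_cast at this ⊢
      rw [this]
      simp [mk2, ht1', hs2]

-- A's full output in closed recursive form
theorem gant_list_eq_mk (r0 : List Int) (rest : List (List Int)) :
    gant_list (r0 :: rest) = (mk1 0 (r0 :: rest), mk2 0 (rIdx r0 1) (r0 :: rest)) := by
  unfold gant_list
  simp only [List.nil_append]
  set c01 := aIdx (r0 :: rest) 0 1 with hc01
  set c02 := aIdx (r0 :: rest) 0 2 with hc02
  have h1 : (PySem.List.pyRange 1 (PySem.List.len (r0 :: rest)) 1).foldl
      (fun db1 i => db1 ++ [[aIdx db1 (i - 1) 1, aIdx db1 (i - 1) 1 + aIdx (r0 :: rest) i 1]])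
      [[0, c01]] = [[0, c01]] ++ mk1 c01 rest := by
    have := loop1_inv (r0 :: rest) rest 1 [[0, c01]] c01 (by simp) (by simp) (by omega)
      (by norm_num [aIdx, PySem.List.pyGetD])
    simpa using this
  rw [h1]
  set D1 : List (List Int) := [[0, c01]] ++ mk1 c01 rest with hD1def
  have hD1len : D1.length = (r0 :: rest).length := by
    simp [hD1def, length_mk1]
  have hD10 : aIdx D1 0 1 = c01 := by
    norm_num [hD1def, aIdx, PySem.List.pyGetD]
  rw [hD10]
  have h2 : (PySem.List.pyRange 1 (PySem.List.len D1) 1).foldl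
      (fun db2 i =>
        if aIdx D1 i 1 ≥ aIdx db2 (i - 1) 1 then
          db2 ++ [[aIdx D1 i 1, aIdx D1 i 1 + aIdx (r0 :: rest) i 2]]
        else
          db2 ++ [[aIdx db2 (i - 1) 1, aIdx db2 (i - 1) 1 + aIdx (r0 :: rest) i 2]])
      [[c01, c01 + c02]] = [[c01, c01 + c02]] ++ mk2 c01 (c01 + c02) rest := by
    have := loop2_inv (r0 :: rest) D1 hD1len rest 1 [[c01, c01 + c02]] c01 (c01 + c02)
      (by simp) (by simp [hD1def]) (by simp) (by omega)
      (by norm_num [aIdx, PySem.List.pyGetD])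
    simpa using this
  rw [h2]
  have hc1 : c01 = rIdx r0 1 := by simp [hc01, aIdx, rIdx, PySem.List.pyGetD]
  have hc2 : c02 = rIdx r0 2 := by simp [hc02, aIdx, rIdx, PySem.List.pyGetD]
  rw [Prod.mk.injEq]
  constructor
  · simp [mk1, hD1def, hc1]
  · simp [mk2, hc1, hc2]

-- ===== VERDICT (by name: the statement is the Claim_ definition above) =====
theorem gant_list_spec : Claim_equal_gant_list := by
  intro C _hdom hpre
  obtain ⟨hne, _hrows⟩ := hpre
  obtain ⟨r0, rest, rfl⟩ := List.exists_cons_of_ne_nil hne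
  unfold Spec_gant_list
  rw [gant_list_eq_mk]
  unfold gant_list_alt
  set c01 := rIdx r0 1 with hc01
  set s1 := sc 1 0 (r0 :: rest) with hs1
  set s2 := sc 2 0 (r0 :: rest) with hs2
  have hpp := alt_pp (r0 :: rest) [] [] 0 0
  simp only [List.nil_append, List.singleton_append] at hpp
  rw [hpp]
  simp only [PySem.List.slice_from_one, List.tail_cons]
  have hm0 : PySem.List.pyGetD (0 :: s1) 1 0 = c01 := by
    simp [hs1, sc, PySem.List.pyGetD, hc01]
  rw [hm0]
  rw [alt_delays]
  simp only [List.nil_append, map_zip_eq_zipWith]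
  have hfin : fin2 0 c01 (r0 :: rest)
      = List.zipWith (fun a b => a + b) s2
          (cummax c01 (List.zipWith (fun a b => a - b) s1 (0 :: s2))) := by
    have := fin2_closed (r0 :: rest) 0 0 c01
    simpa [hs1, hs2] using this
  rw [Prod.mk.injEq]
  constructor
  · exact mk1_eq_zip (r0 :: rest) 0
  · rw [mk2_eq_zip, hfin]
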